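-- pv_equiv track=rewrite | github.com/gkevinb/MasterThesis | cutset_to_gate.py | create_event_cut_set_dict
-- ===== SOURCE A (Python) =====
-- def create_event_cut_set_dict(basic_events, cut_sets):
--     event_dictionary = {}
--
--     for basic_event in basic_events:
--         event = [basic_event]
--         cut_set_ids = set()
--         for i in range(len(cut_sets)):
--             if basic_event in cut_sets[i]:
--                 cut_set_ids.add(i)
--         event_dictionary[tuple(event)] = cut_set_ids
--
--     return event_dictionary
-- ===== SOURCE B (Python) =====
-- def create_event_cut_set_dict(basic_events, cut_sets):
--     index = {}
--     for i, cut_set in enumerate(cut_sets):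
--         for event in cut_set:
--             index.setdefault(event, set()).add(i)
--     return {(basic_event,): index.get(basic_event, set()) for basic_event in basic_events}
-- ===== Notes on version B (the rewrite author's own statement) =====
-- stated objective: faster
-- what changed: Replaces the per-event scan over every cut set with a single inverted-index pass over cut_sets followed by an O(1) lookup per basic event.
import Mathlib
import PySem

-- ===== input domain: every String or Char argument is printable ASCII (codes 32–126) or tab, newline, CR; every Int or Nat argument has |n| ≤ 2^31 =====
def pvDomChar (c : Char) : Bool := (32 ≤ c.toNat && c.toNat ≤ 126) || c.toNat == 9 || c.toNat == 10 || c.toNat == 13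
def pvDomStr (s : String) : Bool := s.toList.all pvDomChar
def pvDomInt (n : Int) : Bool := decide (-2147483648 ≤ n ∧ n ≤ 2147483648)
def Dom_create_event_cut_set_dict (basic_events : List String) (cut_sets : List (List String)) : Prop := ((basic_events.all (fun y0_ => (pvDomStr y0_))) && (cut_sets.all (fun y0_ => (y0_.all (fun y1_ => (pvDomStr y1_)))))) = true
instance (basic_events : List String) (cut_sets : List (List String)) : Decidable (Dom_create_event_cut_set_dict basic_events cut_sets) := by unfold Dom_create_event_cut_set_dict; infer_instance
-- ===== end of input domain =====

-- ===== PORT A =====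
-- B replaces A's per-event scan of all cut sets with one inverted-index pass over cut_sets (objective: faster).
def create_event_cut_set_dict (basic_events : List String) (cut_sets : List (List String)) : List (List String × List Int) :=
  -- event_dictionary = {}; for basic_event in basic_events: build cut_set_ids by scanning range(len(cut_sets))
  (basic_events.foldl
    (fun d basic_event =>
      let event : List String := [basic_event]
      let cut_set_ids : List Int :=
        (PySem.List.pyRange 0 (cut_sets.length : Int) 1).foldl
          (fun s i =>
            if (PySem.List.pyGetD cut_sets i []).contains basic_event then PySem.Set.add s i else s)
          ([] : List Int)
      d.insert event cut_set_ids)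
    (PySem.Dict.empty : PySem.Dict (List String) (List Int))).items

-- ===== PORT B =====
-- index.setdefault(event, set()).add(i) for every element of every cut set (one pass, via enumerate)
def pvBuildIndex (cut_sets : List (List String)) : PySem.Dict String (List Int) :=
  (PySem.List.enumerate cut_sets 0).foldl
    (fun d p => p.2.foldl (fun d event => d.modify event [] (fun s => PySem.Set.add s p.1)) d)
    (PySem.Dict.empty : PySem.Dict String (List Int))

def create_event_cut_set_dict_alt (basic_events : List String) (cut_sets : List (List String)) : List (List String × List Int) :=
  let index := pvBuildIndex cut_sets
  (basic_events.foldl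
    (fun d basic_event => d.insert [basic_event] (index.getD basic_event []))
    (PySem.Dict.empty : PySem.Dict (List String) (List Int))).items

-- ===== PRECONDITION & SPEC =====
def Spec_create_event_cut_set_dict (basic_events : List String) (cut_sets : List (List String)) (out : List (List String × List Int)) : Prop := out = create_event_cut_set_dict_alt basic_events cut_sets
instance (basic_events : List String) (cut_sets : List (List String)) (out : List (List String × List Int)) : Decidable (Spec_create_event_cut_set_dict basic_events cut_sets out) := by unfold Spec_create_event_cut_set_dict; infer_instance

-- ===== CLAIM (what is proved, stated in full; the proofs are below) =====
def Claim_equal_create_event_cut_set_dict : Prop := ∀ (basic_events : List String) (cut_sets : List (List String)), Dom_create_event_cut_set_dict basic_events cut_sets → Spec_create_event_cut_set_dict basic_events cut_sets (create_event_cut_set_dict basic_events cut_sets)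

-- ===== LEMMAS AND PROOFS =====

-- Effect of one inner loop (over a single cut set cs, index i) on the entry of basic_event be.
theorem pv_inner (cs : List String) (i : Int) (d : PySem.Dict String (List Int)) (be : String) :
    (cs.foldl (fun d event => d.modify event [] (fun s => PySem.Set.add s i)) d).getD be []
      = if cs.contains be then PySem.Set.add (d.getD be []) i else d.getD be [] := by
  induction cs generalizing d with
  | nil => simp
  | cons e rest ih =>
    simp only [List.foldl_cons, ih]
    by_cases h : e = be
    · subst h
      simp [PySem.Dict.getD_modify_self]
    · have h' : be ≠ e := fun hh => h hh.symm
      rw [PySem.Dict.getD_modify_of_ne _ _ _ h']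
      simp [h']

-- The inverted index agrees, entrywise, with the scan A performs, for any starting dict.
theorem pv_index (pairs : List (Int × List String)) (d : PySem.Dict String (List Int)) (be : String) :
    (pairs.foldl (fun d p => p.2.foldl (fun d event => d.modify event [] (fun s => PySem.Set.add s p.1)) d) d).getD be []
      = pairs.foldl (fun s p => if p.2.contains be then PySem.Set.add s p.1 else s) (d.getD be []) := by
  induction pairs generalizing d with
  | nil => rfl
  | cons p rest ih =>
    simp only [List.foldl_cons, ih, pv_inner]

-- A's per-event scan equals the lookup in B's index.
theorem pv_ids_eq (cut_sets : List (List String)) (be : String) :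
    (PySem.List.pyRange 0 (cut_sets.length : Int) 1).foldl
        (fun s i => if (PySem.List.pyGetD cut_sets i []).contains be then PySem.Set.add s i else s)
        ([] : List Int)
      = (pvBuildIndex cut_sets).getD be [] := by
  rw [pvBuildIndex, pv_index]
  have hd : (PySem.Dict.empty : PySem.Dict String (List Int)).getD be [] = [] := by
    simp [PySem.Dict.empty, PySem.Dict.getD, PySem.Dict.get?]
  rw [hd, PySem.List.enumerate_eq_map_pyRange cut_sets ([] : List String), List.foldl_map]
  simp [PySem.List.len]

-- ===== VERDICT (by name: the statement is the Claim_ definition above) =====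
theorem create_event_cut_set_dict_spec : Claim_equal_create_event_cut_set_dict := by
  intro basic_events cut_sets _
  show create_event_cut_set_dict basic_events cut_sets = create_event_cut_set_dict_alt basic_events cut_sets
  unfold create_event_cut_set_dict create_event_cut_set_dict_alt
  congr 1
  have hstep : (fun (d : PySem.Dict (List String) (List Int)) basic_event =>
      d.insert [basic_event]
        ((PySem.List.pyRange 0 (cut_sets.length : Int) 1).foldl
          (fun s i =>
            if (PySem.List.pyGetD cut_sets i []).contains basic_event then PySem.Set.add s i else s)
          ([] : List Int)))
    = (fun (d : PySem.Dict (List String) (List Int)) basic_event =>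
      d.insert [basic_event] ((pvBuildIndex cut_sets).getD basic_event [])) := by
    funext d be
    rw [pv_ids_eq]
  rw [hstep]
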